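-- pv_equiv track=rewrite | github.com/Aschio12/LEETCODE-PROBLEM-SOLUTIONS | 2676-find-the-score-of-all-prefixes-of-an-array/find-the-score-of-all-prefixes-of-an-array.py | findPrefixScore
-- ===== SOURCE A (Python) =====
-- from typing import List
--
-- def findPrefixScore(nums: List[int]) -> List[int]:
--     max_,conver,score=float("-inf"),0,0
--     ans=[]
--     prefix=[0]
--     for i in range(len(nums)):
--         max_=max(max_,nums[i])
--         conver=nums[i]+max_
--         score=conver+prefix[-1]
--         prefix.append(score)
--         ans.append(score)
--     return ans
-- ===== SOURCE B (Python) =====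
-- from typing import List
--
-- def findPrefixScore(nums: List[int]) -> List[int]:
--     # divide and conquer: solve(seg, m, s) returns the prefix scores of seg
--     # given incoming running max m (None = no element yet) and incoming score s
--     def solve(seg, m, s):
--         if not seg:
--             return []
--         if len(seg) == 1:
--             x = seg[0]
--             m2 = x if m is None else max(m, x)
--             return [s + x + m2]
--         h = len(seg) // 2
--         left = solve(seg[:h], m, s)
--         mleft = max(seg[:h])
--         mmid = mleft if m is None else max(m, mleft)
--         right = solve(seg[h:], mmid, left[-1])
--         return left + right
--     return solve(nums, None, 0)
-- ===== Notes on version B (the rewrite author's own statement) =====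
-- stated objective: alternative
-- what changed: Replaces the single fused left-to-right loop with a divide-and-conquer recursion: the list is split in half, the left half is solved, and the right half is solved with the carried-in maximum (recomputed via max over the left slice) and carried-in score, the two answer halves concatenated.
import Mathlib
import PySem

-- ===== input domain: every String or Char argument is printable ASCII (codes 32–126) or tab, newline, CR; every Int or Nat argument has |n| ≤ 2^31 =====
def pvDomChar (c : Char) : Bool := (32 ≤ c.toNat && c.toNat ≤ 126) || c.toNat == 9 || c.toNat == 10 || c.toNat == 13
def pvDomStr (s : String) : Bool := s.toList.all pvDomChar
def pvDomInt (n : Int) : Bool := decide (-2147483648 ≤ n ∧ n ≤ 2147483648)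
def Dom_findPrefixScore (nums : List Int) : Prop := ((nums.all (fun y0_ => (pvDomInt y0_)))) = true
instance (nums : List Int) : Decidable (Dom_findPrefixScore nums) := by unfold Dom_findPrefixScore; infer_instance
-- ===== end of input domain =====

-- B computes the same prefix scores by divide and conquer (split in half, carry the
-- left half's max and last score into the right half) instead of A's single loop.

-- ===== PORT A =====
-- float("-inf") is modelled as 'none' of an Option Int: max(-inf, x) = x, exactly
-- Python's behaviour since max_ is only ever compared after absorbing an element.
def findPrefixScore (nums : List Int) : List Int :=
  (PySem.List.pyRange 0 nums.length 1).foldl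
    (fun (st : Option Int × List Int × List Int) i =>
      let max_ := st.1; let pfx := st.2.1; let ans := st.2.2
      let x := PySem.List.pyGetD nums i 0          -- nums[i], i always in range
      let m := match max_ with | none => x | some v => max v x   -- max(max_, nums[i])
      let conver := x + m
      let score := conver + PySem.List.pyGetD pfx (-1) 0      -- prefix[-1]
      (some m, pfx ++ [score], ans ++ [score]))
    (none, [0], [])
  |>.2.2

-- ===== PORT B =====
-- solve(seg, m, s) of Source B; Python's 'x if m is None else max(m, x)' is the match.
-- seg[:h]/seg[h:] with 0 ≤ h ≤ len(seg) are List.take/List.drop exactly;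
-- max(seg[:h]) -> (PySem.List.max? …).getD 0, the slice being nonempty (h ≥ 1);
-- left[-1] -> PySem.List.pyGetD left (-1) 0, left being nonempty.
def pvSolve : List Int → Option Int → Int → List Int
  | [], _, _ => []
  | [x], m, s =>
      let m2 := match m with | none => x | some v => max v x
      [s + x + m2]
  | a :: b :: rest, m, s =>
      let seg := a :: b :: rest
      let h := seg.length / 2
      let left := pvSolve (seg.take h) m s
      let mleft := (PySem.List.max? (seg.take h) (fun y => y)).getD 0
      let mmid := match m with | none => mleft | some v => max v mleft
      let right := pvSolve (seg.drop h) (some mmid) (PySem.List.pyGetD left (-1) 0)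
      left ++ right
termination_by seg _ _ => seg.length
decreasing_by
  · simp only [List.length_take]; simp; omega
  · simp only [List.length_drop]; simp; omega

def findPrefixScore_alt (nums : List Int) : List Int := pvSolve nums none 0

-- ===== PRECONDITION & SPEC =====
def Spec_findPrefixScore (nums : List Int) (out : List Int) : Prop := out = findPrefixScore_alt nums
instance (nums : List Int) (out : List Int) : Decidable (Spec_findPrefixScore nums out) := by unfold Spec_findPrefixScore; infer_instance

-- ===== CLAIM (what is proved, stated in full; the proofs are below) =====
def Claim_equal_findPrefixScore : Prop := ∀ (nums : List Int), Dom_findPrefixScore nums → Spec_findPrefixScore nums (findPrefixScore nums)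

-- ===== LEMMAS AND PROOFS =====

-- reference recursion both ports are reduced to
def pvComb (m : Option Int) (x : Int) : Int := match m with | none => x | some v => max v x

def pvF (m : Option Int) (s : Int) : List Int → List Int
  | [] => []
  | x :: xs =>
      let m' := pvComb m x
      let sc := s + (x + m')
      sc :: pvF (some m') sc xs

-- ---- A side ----
theorem a_loop_eq_pvF (nums : List Int) (m : Option Int) (pre : List Int)
    (last : Int) (ans : List Int) :
    (nums.foldl
      (fun (st : Option Int × List Int × List Int) x =>
        let max_ := st.1; let pfx := st.2.1; let ans := st.2.2
        let mm := match max_ with | none => x | some v => max v x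
        let score := (x + mm) + PySem.List.pyGetD pfx (-1) 0
        (some mm, pfx ++ [score], ans ++ [score]))
      (m, pre ++ [last], ans)).2.2 = ans ++ pvF m last nums := by
  induction nums generalizing m pre last ans with
  | nil => simp [pvF]
  | cons x xs ih =>
      simp only [List.foldl_cons, PySem.List.pyGetD_neg_one_append_singleton, pvF, pvComb]
      rw [show pre ++ [last] ++ [(x + (match m with | none => x | some v => max v x)) + last]
            = (pre ++ [last]) ++ [_] from rfl]
      rw [ih]
      simp [add_comm]

-- ---- B side ----
def pvAcc (m : Option Int) (xs : List Int) : Option Int :=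
  xs.foldl (fun m x => some (pvComb m x)) m

theorem foldl_max_shift (t : List Int) (a b : Int) :
    t.foldl max (max a b) = max a (t.foldl max b) := by
  induction t generalizing b with
  | nil => rfl
  | cons c t ih =>
      simp only [List.foldl_cons]
      rw [max_assoc, ih]

theorem pvAcc_cons (t : List Int) (m : Option Int) (x : Int) :
    pvAcc m (x :: t) = some (pvComb m (t.foldl max x)) := by
  induction t generalizing m x with
  | nil => rfl
  | cons y t ih =>
      show pvAcc (some (pvComb m x)) (y :: t) = _
      rw [ih]
      cases m with
      | none => simp [pvComb, foldl_max_shift]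
      | some v => simp [pvComb, foldl_max_shift, max_assoc]

theorem pvF_append (L R : List Int) (m : Option Int) (s : Int) :
    pvF m s (L ++ R) = pvF m s L ++ pvF (pvAcc m L) ((pvF m s L).getLastD s) R := by
  induction L generalizing m s with
  | nil => simp [pvF, pvAcc]
  | cons x xs ih =>
      simp only [List.cons_append, pvF, ih, List.getLastD_cons]
      rfl

theorem pvF_ne_nil (m : Option Int) (s : Int) (L : List Int) (h : L ≠ []) :
    pvF m s L ≠ [] := by
  cases L with
  | nil => exact absurd rfl h
  | cons x xs => simp [pvF]

theorem pvSolve_cons2 (a b : Int) (rest : List Int) (m : Option Int) (s : Int) :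
    pvSolve (a :: b :: rest) m s =
      (let seg := a :: b :: rest
       let h := seg.length / 2
       let left := pvSolve (seg.take h) m s
       let mleft := (PySem.List.max? (seg.take h) (fun y => y)).getD 0
       let mmid := match m with | none => mleft | some v => max v mleft
       left ++ pvSolve (seg.drop h) (some mmid) (PySem.List.pyGetD left (-1) 0)) := by
  rw [pvSolve.eq_def]

theorem pvGetLast_eq_getLastD (l : List Int) (hl : l ≠ []) (d : Int) :
    l.getLast hl = l.getLastD d := by
  rw [List.getLastD_eq_getLast?, List.getLast?_eq_some_getLast hl]
  rfl

theorem pvSolve_eq_pvF_aux (n : Nat) :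
    ∀ (seg : List Int), seg.length ≤ n → ∀ (m : Option Int) (s : Int),
      pvSolve seg m s = pvF m s seg := by
  induction n with
  | zero =>
      intro seg hlen m s
      have hseg : seg = [] := List.eq_nil_of_length_eq_zero (Nat.le_zero.mp hlen)
      subst hseg; rw [pvSolve.eq_def]; rfl
  | succ n ih =>
      intro seg hlen m s
      match seg with
      | [] => rw [pvSolve.eq_def]; rfl
      | [x] => rw [pvSolve.eq_def]; simp [pvF, pvComb, add_assoc]
      | a :: b :: rest =>
        simp only [List.length_cons] at hlen
        rw [pvSolve_cons2]
        simp only []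
        set h := (a :: b :: rest).length / 2 with hh
        have hl : (a :: b :: rest).length = rest.length + 2 := by simp
        rw [hl] at hh
        have h1 : 1 ≤ h := by omega
        have h2 : h < rest.length + 2 := by omega
        have hta : ((a :: b :: rest).take h).length ≤ n := by
          simp only [List.length_take, hl]; omega
        have hdr : ((a :: b :: rest).drop h).length ≤ n := by
          simp only [List.length_drop, hl]; omega
        rw [ih _ hta, ih _ hdr]
        have htake : (a :: b :: rest).take h = a :: (b :: rest).take (h - 1) := by
          cases hc : h with
          | zero => omega
          | succ k => simp [List.take_succ_cons]
        have hL : (a :: b :: rest).take h ≠ [] := by rw [htake]; simp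
        have hmax : (PySem.List.max? ((a :: b :: rest).take h) (fun y => y)).getD 0
            = ((b :: rest).take (h - 1)).foldl max a := by
          rw [htake, PySem.List.max?_id_cons]; rfl
        have hacc : pvAcc m ((a :: b :: rest).take h)
            = some (match m with
                    | none => (PySem.List.max? ((a :: b :: rest).take h) (fun y => y)).getD 0
                    | some v => max v ((PySem.List.max? ((a :: b :: rest).take h) (fun y => y)).getD 0)) := by
          rw [htake, pvAcc_cons, PySem.List.max?_id_cons]
          cases m <;> simp [pvComb]
        have hlast : PySem.List.pyGetD (pvF m s ((a :: b :: rest).take h)) (-1) 0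
            = (pvF m s ((a :: b :: rest).take h)).getLastD s := by
          have hne := pvF_ne_nil m s ((a :: b :: rest).take h) hL
          rw [PySem.List.pyGetD_neg_one (h := hne), pvGetLast_eq_getLastD _ hne]
        rw [hlast]
        have happ := pvF_append ((a :: b :: rest).take h) ((a :: b :: rest).drop h) m s
        rw [List.take_append_drop] at happ
        rw [happ, hacc]

theorem pvSolve_eq_pvF (seg : List Int) (m : Option Int) (s : Int) :
    pvSolve seg m s = pvF m s seg :=
  pvSolve_eq_pvF_aux seg.length seg (Nat.le_refl _) m s

theorem pvGoalBridge (nums : List Int) : findPrefixScore nums = findPrefixScore_alt nums := by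
  unfold findPrefixScore findPrefixScore_alt
  rw [PySem.List.foldl_pyRange_zero_pyGetD' nums 0
    (fun (st : Option Int × List Int × List Int) x =>
      let max_ := st.1; let pfx := st.2.1; let ans := st.2.2
      let m := match max_ with | none => x | some v => max v x
      let conver := x + m
      let score := conver + PySem.List.pyGetD pfx (-1) 0
      (some m, pfx ++ [score], ans ++ [score])) (none, [0], [])]
  rw [pvSolve_eq_pvF]
  have := a_loop_eq_pvF nums none [] 0 []
  simpa using this

-- ===== VERDICT (by name: the statement is the Claim_ definition above) =====
theorem findPrefixScore_spec : Claim_equal_findPrefixScore := by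
  intro nums _
  unfold Spec_findPrefixScore
  exact pvGoalBridge nums
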